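-- pv_equiv track=rewrite | github.com/JeremyTsaii/LeetCode | ambiguous-coordinates/ambiguous-coordinates.py | possibleNums
-- ===== SOURCE A (Python) =====
-- def possibleNums(s):
--     output = []
--
--     if len(s) == 1:
--         output.append(s)
--     else:
--         if s[0] == "0":
--             found = False
--             for c in s:
--                 if c != "0":
--                     found = True
--             if found and s[-1] != "0":
--                 output.append("0." + s[1:])
--         else:
--             output.append(s)
--             if s[-1] != "0":
--                 for i in range(len(s) - 1):
--                     output.append(s[:i+1] + "." + s[i+1:])
--
--     return output
-- ===== SOURCE B (Python) =====
-- def possibleNums(s):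
--     n = len(s)
--     out = []
--     for i in [n] + list(range(1, n)):
--         intp, frac = s[:i], s[i:]
--         if intp and (len(intp) == 1 or intp[0] != "0") and (frac == "" or frac[-1] != "0"):
--             out.append(intp + "." + frac if frac else intp)
--     return out
-- ===== Notes on version B (the rewrite author's own statement) =====
-- stated objective: simpler
-- what changed: A's three-way case analysis (single char / leading zero / general) is replaced by one uniform scan over every split position i=1..n (i=n meaning no decimal point), keeping a split when the integer part has no illegal leading zero and the fraction no trailing zero; emission order (whole number first, then increasing integer-part length) matches A exactly.
import Mathlib
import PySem

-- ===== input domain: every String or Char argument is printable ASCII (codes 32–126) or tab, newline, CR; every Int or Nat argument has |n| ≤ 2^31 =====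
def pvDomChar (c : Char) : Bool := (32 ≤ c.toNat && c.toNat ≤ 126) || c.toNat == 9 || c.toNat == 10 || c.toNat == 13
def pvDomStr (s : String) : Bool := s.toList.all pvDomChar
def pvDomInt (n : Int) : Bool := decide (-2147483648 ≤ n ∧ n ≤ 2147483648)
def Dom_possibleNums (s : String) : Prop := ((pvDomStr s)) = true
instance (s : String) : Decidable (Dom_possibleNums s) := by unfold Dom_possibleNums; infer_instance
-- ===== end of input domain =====

-- ===== PORT A =====
-- B replaces A's case analysis by one uniform scan over split positions; same output, same order.
-- (Equivalence is claimed on Pre_ = nonempty strings: on "" Python A raises IndexError at s[0].)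

-- the 'found' scan of A's leading-zero branch
def pvFoundLoop (cs : List Char) : Bool :=
  cs.foldl (fun found c => if c ≠ '0' then true else found) false

-- the element A's inner loop appends at index i : s[:i+1] + "." + s[i+1:]
def pvAEmit (cs : List Char) (i : Int) : List Char :=
  PySem.List.slice cs none (some (i+1)) ++ '.' :: PySem.List.slice cs (some (i+1)) none

-- A on the character list; s[0] / s[-1] via pyGet? (none exactly where Python raises)
def pvACore (cs : List Char) : List (List Char) :=
  if cs.length = 1 then [cs]
  else if PySem.List.pyGet? cs 0 = some '0' then
    if pvFoundLoop cs = true ∧ PySem.List.pyGet? cs (-1) ≠ some '0' then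
      [['0', '.'] ++ PySem.List.slice cs (some 1) none]
    else []
  else
    if PySem.List.pyGet? cs (-1) ≠ some '0' then
      (PySem.List.pyRange 0 ((cs.length : Int) - 1)).foldl
        (fun out i => out ++ [pvAEmit cs i]) [cs]
    else [cs]

def possibleNums (s : String) : List String := (pvACore s.toList).map String.ofList

-- ===== PORT B =====
-- keep split i iff the integer part s[:i] is nonempty without illegal leading zero
-- and the fraction s[i:] is empty or has no trailing zero
def pvBKeep (cs : List Char) (i : Int) : Bool :=
  let intp := PySem.List.slice cs none (some i)
  let frac := PySem.List.slice cs (some i) none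
  !intp.isEmpty && (intp.length == 1 || PySem.List.pyGet? intp 0 != some '0')
    && (frac.isEmpty || PySem.List.pyGet? frac (-1) != some '0')

-- what B appends for split i : s[:i] + "." + s[i:] if the fraction is nonempty, else s[:i]
def pvBEmit (cs : List Char) (i : Int) : List Char :=
  let intp := PySem.List.slice cs none (some i)
  let frac := PySem.List.slice cs (some i) none
  if frac.isEmpty then intp else intp ++ '.' :: frac

def pvBCore (cs : List Char) : List (List Char) :=
  let n : Int := cs.length
  (n :: PySem.List.pyRange 1 n).foldl
    (fun out i => if pvBKeep cs i then out ++ [pvBEmit cs i] else out) []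

def possibleNums_alt (s : String) : List String := (pvBCore s.toList).map String.ofList

-- ===== PRECONDITION & SPEC =====
-- Pre_ excludes only the empty string, on which A raises IndexError at s[0].
def Pre_possibleNums (s : String) : Prop := s ≠ ""
instance (s : String) : Decidable (Pre_possibleNums s) := by unfold Pre_possibleNums; infer_instance
def pvWitness_possibleNums : String := "105"

def Spec_possibleNums (s : String) (out : List String) : Prop := out = possibleNums_alt s
instance (s : String) (out : List String) : Decidable (Spec_possibleNums s out) := by unfold Spec_possibleNums; infer_instance

-- ===== CLAIM (what is proved, stated in full; the proofs are below) =====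
def Claim_equal_possibleNums : Prop := ∀ (s : String), Dom_possibleNums s → Pre_possibleNums s → Spec_possibleNums s (possibleNums s)

-- ===== LEMMAS AND PROOFS =====

lemma pvPyGet_neg_one (cs : List Char) : PySem.List.pyGet? cs (-1) = cs.getLast? := by
  simp only [PySem.List.pyGet?, PySem.List.pyIdx?, Int.reduceNeg, Int.neg_nonneg, Int.reduceLE,
    ↓reduceIte, neg_le_neg_iff, Nat.one_le_cast, neg_neg, Int.toNat_one]
  rcases cs with _ | ⟨c, t⟩
  · simp
  · simp [List.getLast?_eq_getElem?]

lemma pvPyGet_cons_zero (c : Char) (t : List Char) :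
    PySem.List.pyGet? (c :: t) 0 = some c := by
  simp [PySem.List.pyGet?, PySem.List.pyIdx?]

lemma pvRangeOneShift (m : Nat) :
    PySem.List.pyRange 1 ((m : Int) + 1) = (List.range m).map (fun (k : Nat) => (k : Int) + 1) := by
  induction m with
  | zero => simp [PySem.List.pyRange]
  | succ k ih =>
    rw [show ((k+1 : Nat) : Int) = (k : Int) + 1 by push_cast; ring,
        PySem.List.pyRange_one_succ_right (by omega), ih, List.range_succ]
    simp

lemma pvFoundLoop_acc (cs : List Char) (b : Bool) :
    cs.foldl (fun found c => if c ≠ '0' then true else found) b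
      = (b || cs.any (fun c => c ≠ '0')) := by
  induction cs generalizing b with
  | nil => simp
  | cons c t ih =>
    simp only [List.foldl_cons, List.any_cons, ih]
    by_cases hc : c = '0' <;> simp [hc]

lemma pvFoundLoop_of_mem (cs : List Char) (c : Char) (hc : c ∈ cs) (h : c ≠ '0') :
    pvFoundLoop cs = true := by
  unfold pvFoundLoop
  rw [pvFoundLoop_acc]
  simp only [Bool.false_or, List.any_eq_true]
  exact ⟨c, hc, by simp [h]⟩

-- pvBKeep at an interior split 1 ≤ k < n
lemma pvBKeep_mid (cs : List Char) (k : Nat) (h1 : 1 ≤ k) (h2 : k < cs.length) :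
    pvBKeep cs (k : Int)
      = (((k == 1) || (cs[0]? != some '0')) && (cs.getLast? != some '0')) := by
  unfold pvBKeep
  rw [PySem.List.slice_to cs (by positivity), PySem.List.slice_from cs (by positivity)]
  simp only [Int.toNat_natCast]
  have htk : (cs.take k).length = k := by rw [List.length_take]; omega
  have hne : ¬ cs.take k = [] := by
    intro h; rw [h] at htk; simp at htk; omega
  have hte : (cs.take k).isEmpty = false := List.isEmpty_eq_false_iff.mpr hne
  have hdne : (cs.drop k).isEmpty = false := by
    rw [List.isEmpty_eq_false_iff, List.ne_nil_iff_length_pos, List.length_drop]; omega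
  have hget : PySem.List.pyGet? (cs.take k) 0 = cs[0]? := by
    rcases cs with _ | ⟨c, t⟩
    · simp at h2
    · rcases k with _ | k'
      · omega
      · simp [List.take_succ_cons, PySem.List.pyGet?, PySem.List.pyIdx?]
  have hlast : PySem.List.pyGet? (cs.drop k) (-1) = cs.getLast? := by
    rw [pvPyGet_neg_one, List.getLast?_drop, if_neg (by omega)]
  simp [hte, hdne, htk, hget, hlast]

-- pvBKeep at the split n (no decimal point), length ≥ 2
lemma pvBKeep_top (cs : List Char) (h : 2 ≤ cs.length) :
    pvBKeep cs (cs.length : Int) = (cs[0]? != some '0') := by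
  unfold pvBKeep
  rw [PySem.List.slice_to cs (by positivity), PySem.List.slice_from cs (by positivity)]
  simp only [Int.toNat_natCast, List.take_length, List.drop_length]
  have hte : cs.isEmpty = false := List.isEmpty_eq_false_iff.mpr
    (by intro hh; simp [hh] at h)
  have hl : (cs.length == 1) = false := by rw [beq_eq_false_iff_ne]; omega
  have hget : PySem.List.pyGet? cs 0 = cs[0]? := by
    rcases cs with _ | ⟨c, t⟩
    · simp at h
    · exact pvPyGet_cons_zero _ _
  simp [hte, hl, hget]

lemma pvBEmit_top (cs : List Char) :
    pvBEmit cs (cs.length : Int) = cs := by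
  unfold pvBEmit
  rw [PySem.List.slice_to cs (by positivity), PySem.List.slice_from cs (by positivity)]
  simp

lemma pvBEmit_mid (cs : List Char) (k : Nat) (h2 : k < cs.length) :
    pvBEmit cs (k : Int) = cs.take k ++ '.' :: cs.drop k := by
  unfold pvBEmit
  rw [PySem.List.slice_to cs (by positivity), PySem.List.slice_from cs (by positivity)]
  simp only [Int.toNat_natCast]
  rw [if_neg (by simp [List.isEmpty_iff, List.drop_eq_nil_iff]; omega)]

lemma pvBCore_eq_filter (cs : List Char) :
    pvBCore cs
      = ((((cs.length : Int)) :: PySem.List.pyRange 1 (cs.length : Int)).filter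
          (pvBKeep cs)).map (pvBEmit cs) := by
  unfold pvBCore
  rw [PySem.List.foldl_append_if (pvBKeep cs) (pvBEmit cs)]
  simp

lemma pvBKeep_shift (cs : List Char) (k : Nat) (h : k + 1 < cs.length) :
    pvBKeep cs ((k : Int) + 1)
      = (((k + 1 == 1) || (cs[0]? != some '0')) && (cs.getLast? != some '0')) := by
  rw [show ((k : Int) + 1) = ((k + 1 : Nat) : Int) by push_cast; ring]
  exact pvBKeep_mid cs (k + 1) (by omega) h

lemma pvBEmit_shift (cs : List Char) (k : Nat) (h : k + 1 < cs.length) :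
    pvBEmit cs ((k : Int) + 1) = cs.take (k + 1) ++ '.' :: cs.drop (k + 1) := by
  rw [show ((k : Int) + 1) = ((k + 1 : Nat) : Int) by push_cast; ring]
  exact pvBEmit_mid cs (k + 1) h

lemma pvAEmit_eq (cs : List Char) (k : Nat) :
    pvAEmit cs (k : Int) = cs.take (k + 1) ++ '.' :: cs.drop (k + 1) := by
  unfold pvAEmit
  rw [PySem.List.slice_to cs (by positivity), PySem.List.slice_from cs (by positivity)]
  norm_num

-- the central equality on character lists
lemma pvCore_eq (cs : List Char) (h : cs ≠ []) : pvACore cs = pvBCore cs := by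
  obtain ⟨c, t, rfl⟩ : ∃ c t, cs = c :: t := by
    rcases cs with _ | ⟨c, t⟩
    · exact absurd rfl h
    · exact ⟨c, t, rfl⟩
  rcases t with _ | ⟨d, u⟩
  · rfl
  set t := d :: u with hts
  have hlen : (c :: t).length = t.length + 1 := rfl
  have htpos : 1 ≤ t.length := by simp [hts]
  have hlen1 : ¬ (c :: t).length = 1 := by omega
  have hcastn : ((c :: t).length : Int) = (t.length : Int) + 1 := by
    rw [hlen]; push_cast; ring
  have hrangeB : PySem.List.pyRange 1 ((c :: t).length : Int)
      = (List.range t.length).map (fun (k : Nat) => (k : Int) + 1) := by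
    rw [hcastn, pvRangeOneShift]
  -- B as a filtered map
  rw [pvBCore_eq_filter, List.filter_cons, pvBKeep_top _ (by omega), hrangeB, List.filter_map]
  have hget0 : PySem.List.pyGet? (c :: t) 0 = some c := pvPyGet_cons_zero c t
  have hgetm1 : PySem.List.pyGet? (c :: t) (-1) = (c :: t).getLast? := pvPyGet_neg_one _
  have hshiftall : ∀ k ∈ List.range t.length,
      (pvBKeep (c :: t) ∘ fun (k : Nat) => (k : Int) + 1) k
        = (((k + 1 == 1) || ((c :: t)[0]? != some '0')) && ((c :: t).getLast? != some '0')) := by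
    intro k hk
    rw [List.mem_range] at hk
    exact pvBKeep_shift (c :: t) k (by omega)
  rw [List.filter_congr hshiftall]
  by_cases hc : c = '0'
  · -- leading-zero branch of A; B keeps only the split i = 1 (if the last char is not '0')
    unfold pvACore
    rw [if_neg hlen1, if_pos (by rw [hget0, hc])]
    have htop : ((c :: t)[0]? != some '0') = false := by simp [hc]
    rw [htop]
    simp only [Bool.false_eq_true, if_false, Bool.or_false]
    by_cases hl : (c :: t).getLast? = some '0'
    · rw [if_neg (by rw [hgetm1]; simp [hl])]
      rw [List.filter_eq_nil_iff.mpr (by intro x _; simp [hl])]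
      simp
    · obtain ⟨e, he⟩ : ∃ e, (c :: t).getLast? = some e := by
        rcases hgl : (c :: t).getLast? with _ | e
        · simp at hgl
        · exact ⟨e, rfl⟩
      have hee : e ≠ '0' := by rintro rfl; exact hl he
      have hfound : pvFoundLoop (c :: t) = true :=
        pvFoundLoop_of_mem _ e (List.mem_of_getLast? he) hee
      rw [if_pos ⟨hfound, by rw [hgetm1]; exact hl⟩]
      have hltrue : ((c :: t).getLast? != some '0') = true := by simp [he, hee]
      rw [List.filter_congr (fun x _ => by rw [hltrue, Bool.and_true])]
      obtain ⟨m, hm⟩ : ∃ m, t.length = m + 1 := ⟨u.length, by simp [hts]⟩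
      rw [hm, List.range_succ_eq_map, List.filter_cons]
      have h01 : ((0 + 1 == 1) = true) := rfl
      rw [if_pos h01, List.filter_map,
          List.filter_eq_nil_iff.mpr (fun x _ => by simp), List.map_nil, List.map_cons,
          List.map_nil, List.map_cons, List.map_nil]
      rw [pvBEmit_shift _ 0 (by omega)]
      rw [PySem.List.slice_from _ (by norm_num)]
      simp [hc]
  · -- general branch of A
    unfold pvACore
    rw [if_neg hlen1, if_neg (by rw [hget0]; simp [hc])]
    have htop : ((c :: t)[0]? != some '0') = true := by simp [hc]
    by_cases hl : (c :: t).getLast? = some '0'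
    · -- trailing zero: A = [s]; B keeps only the full split
      rw [if_neg (by rw [hgetm1]; simp [hl])]
      have : ∀ k ∈ List.range t.length,
          ¬ ((((k + 1 == 1) || ((c :: t)[0]? != some '0')) && ((c :: t).getLast? != some '0')) = true) := by
        intro k _
        simp [hl]
      rw [List.filter_eq_nil_iff.mpr this, htop, if_pos rfl, List.map_nil, List.map_cons,
          List.map_nil, pvBEmit_top]
    · -- no trailing zero: all splits kept, aligned index by index
      rw [if_pos (by rw [hgetm1]; exact hl)]
      rw [PySem.List.foldl_append_singleton_eq_map]
      have hrangeA : PySem.List.pyRange 0 (((c :: t).length : Int) - 1)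
          = (List.range t.length).map (fun (k : Nat) => (k : Int)) := by
        rw [show (((c :: t).length : Int) - 1) = ((t.length : Nat) : Int) by omega]
        exact PySem.List.pyRange_zero_natCast t.length
      have hall : ∀ k ∈ List.range t.length,
          (((k + 1 == 1) || ((c :: t)[0]? != some '0')) && ((c :: t).getLast? != some '0')) = true := by
        intro k _
        simp [hl, hc]
      rw [List.filter_eq_self.mpr hall, hrangeA, htop]
      simp only [↓reduceIte, List.map_map, List.map_cons, pvBEmit_top, List.singleton_append]
      refine congrArg (List.cons _) (List.map_congr_left ?_)
      intro k hk
      rw [List.mem_range] at hk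
      simp only [Function.comp_apply]
      rw [pvBEmit_shift _ k (by omega), pvAEmit_eq]

-- ===== VERDICT (by name: the statement is the Claim_ definition above) =====
theorem possibleNums_spec : Claim_equal_possibleNums := by
  intro s _ hpre
  unfold Spec_possibleNums possibleNums possibleNums_alt
  rw [pvCore_eq]
  intro hnil
  exact hpre (String.toList_eq_nil_iff.mp hnil)
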